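-- pv_equiv track=rewrite | github.com/Vaibhavbasidoni/AI-Powered-Documentation-Generator | backend/app/services/documentation.py | determine_project_type
-- ===== SOURCE A (Python) =====
-- from typing import Dict, Any, List, Optional
--
-- def determine_project_type(extensions: set, files_content: Dict[str, str]) -> str:
--     """Determine the type of project based on files and content."""
--     if 'py' in extensions:
--         if any('streamlit' in content.lower() for content in files_content.values()):
--             return 'Streamlit Application'
--         if any('django' in content.lower() for content in files_content.values()):
--             return 'Django Application'
--         if any('flask' in content.lower() for content in files_content.values()):
--             return 'Flask Application'
--         return 'Python Project'
--
--     if 'js' in extensions or 'jsx' in extensions: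
--         if any('react' in content.lower() for content in files_content.values()):
--             return 'React Application'
--         if any('next' in content.lower() for content in files_content.values()):
--             return 'Next.js Application'
--         return 'JavaScript Project'
--
--     if 'java' in extensions:
--         if any('springframework' in content.lower() for content in files_content.values()):
--             return 'Spring Boot Application'
--         return 'Java Project'
--
--     if 'go' in extensions:
--         return 'Go Project'
--
--     if 'rs' in extensions:
--         return 'Rust Project'
--
--     return 'Generic Software Project'
-- ===== SOURCE B (Python) =====
-- def determine_project_type(extensions: set, files_content) -> str:
--     """Determine the type of project based on files and content."""
--     keywords = ('streamlit', 'django', 'flask', 'react', 'next', 'springframework')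
--     found = set()
--     for content in files_content.values():
--         c = content.lower()
--         for kw in keywords:
--             if kw in c:
--                 found.add(kw)
--     if 'py' in extensions:
--         if 'streamlit' in found:
--             return 'Streamlit Application'
--         if 'django' in found:
--             return 'Django Application'
--         if 'flask' in found:
--             return 'Flask Application'
--         return 'Python Project'
--     if 'js' in extensions or 'jsx' in extensions:
--         if 'react' in found:
--             return 'React Application'
--         if 'next' in found:
--             return 'Next.js Application'
--         return 'JavaScript Project'
--     if 'java' in extensions:
--         if 'springframework' in found:
--             return 'Spring Boot Application'
--         return 'Java Project'
--     if 'go' in extensions: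
--         return 'Go Project'
--     if 'rs' in extensions:
--         return 'Rust Project'
--     return 'Generic Software Project'
-- ===== Notes on version B (the rewrite author's own statement) =====
-- stated objective: alternative
-- what changed: B makes a single pass over the contents, lowering each exactly once and collecting every occurring keyword into a set, then the extension branch tree only does O(1) membership tests instead of re-scanning (and re-lowering) all contents per keyword.
import Mathlib
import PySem

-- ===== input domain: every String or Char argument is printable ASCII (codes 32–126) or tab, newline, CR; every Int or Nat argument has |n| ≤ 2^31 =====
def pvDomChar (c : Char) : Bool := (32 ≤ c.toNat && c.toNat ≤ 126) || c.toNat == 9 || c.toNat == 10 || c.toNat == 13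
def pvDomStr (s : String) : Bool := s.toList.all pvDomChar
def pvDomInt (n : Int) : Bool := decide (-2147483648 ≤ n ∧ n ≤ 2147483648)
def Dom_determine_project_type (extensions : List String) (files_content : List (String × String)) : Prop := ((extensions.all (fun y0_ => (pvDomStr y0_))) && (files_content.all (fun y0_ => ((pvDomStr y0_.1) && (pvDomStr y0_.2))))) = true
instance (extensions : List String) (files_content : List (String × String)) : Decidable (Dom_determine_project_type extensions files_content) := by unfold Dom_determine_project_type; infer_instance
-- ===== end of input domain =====

-- B replaces A's repeated per-keyword rescans (each any(...) re-lowering every content) by one pass that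
-- lowers each content once and collects the occurring keywords into a set, then tests membership.

-- ===== PORT A =====
def determine_project_type (extensions : List String) (files_content : List (String × String)) : String :=
  if extensions.contains "py" then
    if ((PySem.Dict.ofList files_content).values).any (fun content => PySem.Str.isIn "streamlit" (PySem.Str.lower content)) then "Streamlit Application"
    else if ((PySem.Dict.ofList files_content).values).any (fun content => PySem.Str.isIn "django" (PySem.Str.lower content)) then "Django Application"
    else if ((PySem.Dict.ofList files_content).values).any (fun content => PySem.Str.isIn "flask" (PySem.Str.lower content)) then "Flask Application"
    else "Python Project"
  else if extensions.contains "js" || extensions.contains "jsx" then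
    if ((PySem.Dict.ofList files_content).values).any (fun content => PySem.Str.isIn "react" (PySem.Str.lower content)) then "React Application"
    else if ((PySem.Dict.ofList files_content).values).any (fun content => PySem.Str.isIn "next" (PySem.Str.lower content)) then "Next.js Application"
    else "JavaScript Project"
  else if extensions.contains "java" then
    if ((PySem.Dict.ofList files_content).values).any (fun content => PySem.Str.isIn "springframework" (PySem.Str.lower content)) then "Spring Boot Application"
    else "Java Project"
  else if extensions.contains "go" then "Go Project"
  else if extensions.contains "rs" then "Rust Project"
  else "Generic Software Project"

-- ===== PORT B =====
def dptKeywords : List String := ["streamlit", "django", "flask", "react", "next", "springframework"]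

-- the set of keywords occurring in some (lowered) content: B's single collecting pass
def dptFound (files_content : List (String × String)) : PySem.Set String :=
  ((PySem.Dict.ofList files_content).values).foldl
    (fun acc content =>
      let c := PySem.Str.lower content
      dptKeywords.foldl (fun a kw => if PySem.Str.isIn kw c then PySem.Set.add a kw else a) acc)
    PySem.Set.empty

def determine_project_type_alt (extensions : List String) (files_content : List (String × String)) : String :=
  let found := dptFound files_content
  if extensions.contains "py" then
    if found.contains "streamlit" then "Streamlit Application"
    else if found.contains "django" then "Django Application"
    else if found.contains "flask" then "Flask Application"
    else "Python Project"
  else if extensions.contains "js" || extensions.contains "jsx" then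
    if found.contains "react" then "React Application"
    else if found.contains "next" then "Next.js Application"
    else "JavaScript Project"
  else if extensions.contains "java" then
    if found.contains "springframework" then "Spring Boot Application"
    else "Java Project"
  else if extensions.contains "go" then "Go Project"
  else if extensions.contains "rs" then "Rust Project"
  else "Generic Software Project"

-- ===== PRECONDITION & SPEC =====
def Spec_determine_project_type (extensions : List String) (files_content : List (String × String)) (out : String) : Prop := out = determine_project_type_alt extensions files_content
instance (extensions : List String) (files_content : List (String × String)) (out : String) : Decidable (Spec_determine_project_type extensions files_content out) := by unfold Spec_determine_project_type; infer_instance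

-- ===== CLAIM (what is proved, stated in full; the proofs are below) =====
def Claim_equal_determine_project_type : Prop := ∀ (extensions : List String) (files_content : List (String × String)), Dom_determine_project_type extensions files_content → Spec_determine_project_type extensions files_content (determine_project_type extensions files_content)

-- ===== LEMMAS AND PROOFS =====

-- per-content inner fold: k ends up in the accumulator iff it was there or it is a keyword occurring in c
lemma mem_inner_fold (ks : List String) (acc : PySem.Set String) (c : String) (k : String) :
    k ∈ ks.foldl (fun a kw => if PySem.Str.isIn kw c then PySem.Set.add a kw else a) acc ↔
      k ∈ acc ∨ (k ∈ ks ∧ PySem.Str.isIn k c = true) := by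
  induction ks generalizing acc with
  | nil => simp
  | cons kw rest ih =>
    simp only [List.foldl_cons]
    by_cases hkw : k = kw
    · subst hkw
      by_cases h : PySem.Str.isIn k c = true
      · rw [if_pos h, ih]
        simp only [PySem.Set.mem_add, List.mem_cons]
        constructor
        · intro _
          exact Or.inr ⟨Or.inl trivial, h⟩
        · intro _
          exact Or.inl (Or.inr trivial)
      · rw [if_neg h, ih]
        simp only [List.mem_cons]
        constructor
        · rintro (ha | ⟨hr, hk⟩)
          · exact Or.inl ha
          · exact Or.inr ⟨Or.inr hr, hk⟩
        · rintro (ha | ⟨(_ | hr), hk⟩)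
          · exact Or.inl ha
          · exact absurd hk h
          · exact Or.inr ⟨hr, hk⟩
    · by_cases h : PySem.Str.isIn kw c = true
      · rw [if_pos h, ih]
        simp only [PySem.Set.mem_add, List.mem_cons]
        constructor
        · rintro ((ha | he) | ⟨hr, hk⟩)
          · exact Or.inl ha
          · exact absurd he hkw
          · exact Or.inr ⟨Or.inr hr, hk⟩
        · rintro (ha | ⟨(he | hr), hk⟩)
          · exact Or.inl (Or.inl ha)
          · exact absurd he hkw
          · exact Or.inr ⟨hr, hk⟩
      · rw [if_neg h, ih]
        simp only [List.mem_cons]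
        constructor
        · rintro (ha | ⟨hr, hk⟩)
          · exact Or.inl ha
          · exact Or.inr ⟨Or.inr hr, hk⟩
        · rintro (ha | ⟨(he | hr), hk⟩)
          · exact Or.inl ha
          · exact absurd he hkw
          · exact Or.inr ⟨hr, hk⟩

-- outer fold over the contents
lemma mem_outer_fold (l : List String) (acc : PySem.Set String) (k : String) :
    k ∈ l.foldl (fun acc content =>
        dptKeywords.foldl (fun a kw => if PySem.Str.isIn kw (PySem.Str.lower content) then PySem.Set.add a kw else a) acc) acc ↔
      k ∈ acc ∨ (k ∈ dptKeywords ∧ ∃ c ∈ l, PySem.Str.isIn k (PySem.Str.lower c) = true) := by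
  induction l generalizing acc with
  | nil => simp
  | cons c rest ih =>
    simp only [List.foldl_cons, ih, mem_inner_fold]
    constructor
    · rintro ((ha | ⟨hk, hc⟩) | ⟨hk, c', hc', hk'⟩)
      · exact Or.inl ha
      · exact Or.inr ⟨hk, c, List.mem_cons_self .., hc⟩
      · exact Or.inr ⟨hk, c', List.mem_cons_of_mem _ hc', hk'⟩
    · rintro (ha | ⟨hk, c', hc', hk'⟩)
      · exact Or.inl (Or.inl ha)
      · rcases List.mem_cons.mp hc' with rfl | hr
        · exact Or.inl (Or.inr ⟨hk, hk'⟩)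
        · exact Or.inr ⟨hk, c', hr, hk'⟩
  
-- B's set membership equals A's any-scan, for each keyword of interest
lemma found_contains (files_content : List (String × String)) (k : String) (hk : k ∈ dptKeywords) :
    (dptFound files_content).contains k =
      ((PySem.Dict.ofList files_content).values).any (fun content => PySem.Str.isIn k (PySem.Str.lower content)) := by
  have h := mem_outer_fold ((PySem.Dict.ofList files_content).values) PySem.Set.empty k
  simp only [PySem.Set.empty, List.not_mem_nil, false_or] at h
  rw [Bool.eq_iff_iff, List.any_eq_true]
  rw [show ((dptFound files_content).contains k = true) ↔ k ∈ dptFound files_content from by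
    simp [PySem.Set.contains]]
  simp only [dptFound, PySem.Set.empty]
  rw [h]
  constructor
  · rintro ⟨_, c, hc, hkc⟩
    exact ⟨c, hc, hkc⟩
  · rintro ⟨c, hc, hkc⟩
    exact ⟨hk, c, hc, hkc⟩

theorem determine_project_type_spec : Claim_equal_determine_project_type := by
  intro extensions files_content _
  simp only [Spec_determine_project_type, determine_project_type, determine_project_type_alt]
  simp only [found_contains files_content "streamlit" (by decide),
      found_contains files_content "django" (by decide),
      found_contains files_content "flask" (by decide),
      found_contains files_content "react" (by decide),
      found_contains files_content "next" (by decide),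
      found_contains files_content "springframework" (by decide)]
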